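-- pv_equiv track=rewrite | github.com/SpencerBar/Sheridan | AdventOfCode/day1_2.py | checkForwards
-- ===== SOURCE A (Python) =====
-- def checkForwards(list, line):
--     firstNum = -1
--
--     for i in range(len(line)):
--         for key in list:
--             if i <= (len(line) - len(key)):
--                 searchResult=line.find(key,i ,i+len(key))
--                 if searchResult != -1:
--                     firstNum = list[key]
--                     return firstNum
-- ===== SOURCE B (Python) =====
-- def checkForwards(list, line):
--     # One find() per key over the whole line, keeping the leftmost match
--     # (first key in dict order wins ties), instead of A's scan of every position.
--     best_pos = -1
--     best_val = None
--     for key, value in list.items():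
--         p = line.find(key)
--         if p != -1 and (best_pos == -1 or p < best_pos):
--             best_pos, best_val = p, value
--     return best_val
-- ===== Notes on version B (the rewrite author's own statement) =====
-- stated objective: alternative
-- what changed: A scans every position of the line and re-runs a windowed find for every key at each position; B does a single line.find per key over the whole line and keeps the leftmost match (first key wins ties), removing the loop over positions entirely.
-- outside the precondition, e.g. on checkForwards({'': 5}, ''): A returns None, B returns 5
import Mathlib
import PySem

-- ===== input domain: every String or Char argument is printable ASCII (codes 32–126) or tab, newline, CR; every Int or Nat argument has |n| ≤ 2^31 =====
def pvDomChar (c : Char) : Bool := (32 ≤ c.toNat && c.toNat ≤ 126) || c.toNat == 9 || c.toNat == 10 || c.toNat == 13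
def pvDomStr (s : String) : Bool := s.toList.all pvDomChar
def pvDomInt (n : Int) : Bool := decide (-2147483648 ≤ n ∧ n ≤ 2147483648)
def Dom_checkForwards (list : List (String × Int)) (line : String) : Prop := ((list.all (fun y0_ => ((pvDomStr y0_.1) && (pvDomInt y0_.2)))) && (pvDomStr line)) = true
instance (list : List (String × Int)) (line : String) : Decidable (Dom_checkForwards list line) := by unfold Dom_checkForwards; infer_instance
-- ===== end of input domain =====

-- B replaces A's scan of every position (with a windowed find per key at each
-- position) by ONE line.find per key, keeping the leftmost match with first-key
-- tie-break: a different traversal of the same cost (A early-returns, so B is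
-- not claimed faster).

-- ===== PORT A =====
-- Python `list[key]` on the dict argument: first-match association lookup
-- (Pre_ requires distinct keys, so this agrees with the Python dict. Python
-- would raise KeyError on a missing key; that is unreachable here because the
-- key always comes from the list itself, so the `none` branch never matters.)
def pyDictGet : List (String × Int) → String → Option Int
  | [], _ => none
  | (k, v) :: rest, key => if k == key then some v else pyDictGet rest key

-- inner `for key in list:` loop of A at position i (early return = some)
def cfInner (list0 : List (String × Int)) (line : String) (i : Int) :
    List (String × Int) → Option Int
  | [] => none
  | (key, _) :: rest =>
    if i ≤ (PySem.Str.len line - PySem.Str.len key) then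
      -- searchResult = line.find(key, i, i+len(key))
      if PySem.Str.findFrom line key i (some (i + PySem.Str.len key)) ≠ -1 then
        pyDictGet list0 key
      else cfInner list0 line i rest
    else cfInner list0 line i rest

-- outer `for i in range(len(line)):` loop of A
def cfOuter (list : List (String × Int)) (line : String) : List Int → Option Int
  | [] => none
  | i :: rest =>
    match cfInner list line i list with
    | some v => some v
    | none => cfOuter list line rest

def checkForwards (list : List (String × Int)) (line : String) : Option Int :=
  cfOuter list line (PySem.List.pyRange 0 (PySem.Str.len line) 1)

-- ===== PORT B =====
-- Source B: best_pos = -1; best_val = None; for key, value in list.items():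
--   p = line.find(key); if p != -1 and (best_pos == -1 or p < best_pos): update
def checkForwards_alt (list : List (String × Int)) (line : String) : Option Int :=
  (list.foldl
    (fun best kv =>
      let p := PySem.Str.find line kv.1
      if p ≠ -1 ∧ (best.1 = -1 ∨ p < best.1) then (p, some kv.2) else best)
    ((-1 : Int), (none : Option Int))).2

-- ===== PRECONDITION & SPEC =====
-- Pre_ excludes (a) lists with duplicate keys, which cannot occur as the Python
-- dict argument (the dict merges them, keeping the last value, so the raw
-- association list does not determine the Python input), and (b) the corner
-- where the list has the empty-string key AND line is empty: there A's
-- position loop never runs and returns None while B's find matches the empty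
-- pattern at 0 — both defensible readings of a degenerate pattern.
def Pre_checkForwards (list : List (String × Int)) (line : String) : Prop :=
  (list.map Prod.fst).Nodup ∧ ¬ (line = "" ∧ "" ∈ list.map Prod.fst)
instance (list : List (String × Int)) (line : String) : Decidable (Pre_checkForwards list line) := by
  unfold Pre_checkForwards; infer_instance

def pvWitness_checkForwards : (List (String × Int)) × String :=
  ([("one", 1), ("two", 2)], "xtwone")

def Spec_checkForwards (list : List (String × Int)) (line : String) (out : Option Int) : Prop := out = checkForwards_alt list line
instance (list : List (String × Int)) (line : String) (out : Option Int) : Decidable (Spec_checkForwards list line out) := by unfold Spec_checkForwards; infer_instance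

-- ===== CLAIM (what is proved, stated in full; the proofs are below) =====
def Claim_equal_checkForwards : Prop := ∀ (list : List (String × Int)) (line : String), Dom_checkForwards list line → Pre_checkForwards list line → Spec_checkForwards list line (checkForwards list line)

-- ===== LEMMAS AND PROOFS =====

-- first-occurrence position of a pair's key in the line
def fpos (line : String) (kv : String × Int) : Int :=
  PySem.Chars.find line.toList kv.1.toList

-- reference right-recursion: leftmost match, earliest pair wins ties
def refMin (line : String) : List (String × Int) → Option (Int × Int)
  | [] => none
  | kv :: rest =>
    if fpos line kv = -1 then refMin line rest
    else
      match refMin line rest with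
      | none => some (fpos line kv, kv.2)
      | some (p, v) => if fpos line kv ≤ p then some (fpos line kv, kv.2) else some (p, v)

theorem pyDictGet_nodup (list : List (String × Int)) (kv : String × Int)
    (hnd : (list.map Prod.fst).Nodup) (hmem : kv ∈ list) :
    pyDictGet list kv.1 = some kv.2 := by
  induction list with
  | nil => cases hmem
  | cons hd tl ih =>
    simp only [List.map_cons, List.nodup_cons] at hnd
    rcases List.mem_cons.mp hmem with h | h
    · subst h; simp [pyDictGet]
    · have hne : hd.1 ≠ kv.1 := by
        intro he; exact hnd.1 (he ▸ List.mem_map_of_mem h)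
      simp only [pyDictGet]
      rw [if_neg (by simpa using hne)]
      exact ih hnd.2 h

-- the windowed find of A at a nonnegative position j is exactly "key matches at j"
theorem window_iff (line key : String) (j : ℕ) (hj : j ≤ line.toList.length) :
    ((j : Int) ≤ PySem.Str.len line - PySem.Str.len key ∧
      PySem.Str.findFrom line key (j : Int) (some ((j : Int) + PySem.Str.len key)) ≠ -1)
      ↔ key.toList <+: line.toList.drop j := by
  have hs := PySem.Str.len_eq line
  have hk := PySem.Str.len_eq key
  set s := line.toList with hsdef
  set k := key.toList with hkdef
  rw [PySem.Str.findFrom_eq, hs, hk]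
  by_cases hg : (j : Int) ≤ (s.length : Int) - (k.length : Int)
  · -- window is exactly [j, j + |k|)
    have hjk : j + k.length ≤ s.length := by omega
    have hw : List.drop j (List.take (j + k.length) s) = List.take k.length (List.drop j s) := by
      rw [List.drop_take]; congr 1; omega
    have hlenw : (List.take k.length (List.drop j s)).length = k.length := by
      simp; omega
    have hff : PySem.Chars.findFrom s k (j : Int) (some ((j : Int) + (k.length : Int))) ≠ -1
        ↔ k <+: s.drop j := by
      unfold PySem.Chars.findFrom
      have h1 : ¬ ((s.length : Int) < (j : Int) + (k.length : Int)) := by omega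
      have h2 : ¬ ((j : Int) + (k.length : Int) < 0) := by omega
      have h3 : ¬ ((j : Int) < 0) := by omega
      have h4 : ¬ ((j : Int) + (k.length : Int) < (j : Int)) := by omega
      simp only [h1, if_false, h2, h3, h4]
      have h5 : ((j : Int) + (k.length : Int)).toNat = j + k.length := by omega
      have h6 : ((j : Int)).toNat = j := by omega
      rw [h5, h6, hw]
      constructor
      · intro h
        have hfind : PySem.Chars.find (List.take k.length (List.drop j s)) k ≠ -1 := by
          intro hc; rw [hc] at h; simp at h
        have hinf := (PySem.Chars.find_ne_neg_one_iff _ _).mp hfind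
        have heq : k = List.take k.length (List.drop j s) :=
          hinf.sublist.eq_of_length_le (by omega)
        rw [List.prefix_iff_eq_take]; exact heq
      · intro h
        have heq : k = List.take k.length (List.drop j s) := List.prefix_iff_eq_take.mp h
        have hinf : k <:+: List.take k.length (List.drop j s) := heq ▸ List.infix_rfl
        have hfind := (PySem.Chars.find_ne_neg_one_iff _ _).mpr hinf
        intro hc
        rw [if_neg hfind] at hc
        have := PySem.Chars.neg_one_le_find (List.take k.length (List.drop j s)) k
        omega
    rw [hff]
    simp [hg]
  · -- guard false: no match fits either
    constructor
    · intro h; exact absurd h.1 hg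
    · intro h
      exfalso
      have hlen : k.length ≤ (List.drop j s).length := h.length_le
      rw [List.length_drop] at hlen
      omega

-- occurrence facts about find
theorem neg_one_le_fpos (line : String) (kv : String × Int) : -1 ≤ fpos line kv :=
  PySem.Chars.neg_one_le_find _ _

theorem fpos_ne_neg_one_of_occ (line : String) (kv : String × Int) (j : ℕ)
    (h : kv.1.toList <+: line.toList.drop j) : fpos line kv ≠ -1 := by
  have hin := (PySem.Chars.exists_prefix_drop_iff_isIn kv.1.toList line.toList).mp ⟨j, h⟩
  rw [PySem.Chars.isIn_iff_infix] at hin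
  exact (PySem.Chars.find_ne_neg_one_iff _ _).mpr hin

theorem fpos_le_of_occ (line : String) (kv : String × Int) (j : ℕ)
    (h : kv.1.toList <+: line.toList.drop j) : fpos line kv ≤ (j : Int) := by
  have hne := fpos_ne_neg_one_of_occ line kv j h
  have hge : 0 ≤ fpos line kv := by
    have := neg_one_le_fpos line kv; unfold fpos at *; omega
  by_contra hlt
  have hspec := (PySem.Chars.find_spec (s := line.toList) (sub := kv.1.toList) hge).2
  exact hspec j (by unfold fpos at *; omega) h

theorem occ_of_fpos (line : String) (kv : String × Int) (j : ℕ)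
    (h : fpos line kv = (j : Int)) : kv.1.toList <+: line.toList.drop j := by
  have hge : 0 ≤ fpos line kv := by rw [h]; omega
  have hspec := (PySem.Chars.find_spec (s := line.toList) (sub := kv.1.toList) hge).1
  unfold fpos at h
  have : (PySem.Chars.find line.toList kv.1.toList).toNat = j := by omega
  rwa [this] at hspec

theorem fpos_add_len_le (line : String) (kv : String × Int)
    (h : fpos line kv ≠ -1) :
    fpos line kv + (kv.1.toList.length : Int) ≤ (line.toList.length : Int) := by
  have hge : 0 ≤ fpos line kv := by
    have := neg_one_le_fpos line kv; omega
  have hspec := (PySem.Chars.find_spec (s := line.toList) (sub := kv.1.toList) hge).1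
  have hlen : kv.1.toList.length ≤ (List.drop (fpos line kv).toNat line.toList).length :=
    hspec.length_le
  rw [List.length_drop] at hlen
  have hle : fpos line kv ≤ (line.toList.length : Int) := PySem.Chars.find_le_length _ _
  unfold fpos at *
  omega

-- the inner loop finds the first pair matching at position j and looks its key up
theorem cfInner_eq (list : List (String × Int)) (line : String) (j : ℕ)
    (hj : j ≤ line.toList.length) (l : List (String × Int)) :
    cfInner list line (j : Int) l =
      match l.find? (fun kv => kv.1.toList.isPrefixOf (line.toList.drop j)) with
      | some kv => pyDictGet list kv.1
      | none => none := by
  induction l with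
  | nil => simp [cfInner]
  | cons hd tl ih =>
    obtain ⟨key, v⟩ := hd
    by_cases hocc : key.toList <+: line.toList.drop j
    · have hw := (window_iff line key j hj).mpr hocc
      simp only [cfInner]
      rw [if_pos hw.1, if_pos hw.2]
      rw [List.find?_cons_of_pos (by simpa [List.isPrefixOf_iff_prefix] using hocc)]
    · have hp : ¬ (((key, v) : String × Int).1.toList.isPrefixOf (line.toList.drop j) = true) := by
        simpa [List.isPrefixOf_iff_prefix] using hocc
      rw [List.find?_cons_of_neg (by simpa using hp)]
      simp only [cfInner]
      by_cases hg : (j : Int) ≤ PySem.Str.len line - PySem.Str.len key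
      · rw [if_pos hg]
        have hf : ¬ (PySem.Str.findFrom line key (j : Int) (some ((j : Int) + PySem.Str.len key)) ≠ -1) := by
          intro hf
          exact hocc ((window_iff line key j hj).mp ⟨hg, hf⟩)
        rw [if_neg hf]
        exact ih
      · rw [if_neg hg]
        exact ih

-- refMin returns a member's position/value
theorem refMin_mem (line : String) (l : List (String × Int)) (p : Int) (v : Int)
    (h : refMin line l = some (p, v)) :
    ∃ kv ∈ l, fpos line kv = p ∧ kv.2 = v ∧ p ≠ -1 := by
  induction l generalizing p v with
  | nil => simp [refMin] at h
  | cons hd tl ih =>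
    simp only [refMin] at h
    split_ifs at h with h1
    · obtain ⟨kv, hmem, hrest⟩ := ih p v h
      exact ⟨kv, List.mem_cons_of_mem _ hmem, hrest⟩
    · rcases hrm : refMin line tl with _ | ⟨q, w⟩
      · rw [hrm] at h
        simp at h
        exact ⟨hd, List.mem_cons_self, h.1, h.2, h.1 ▸ h1⟩
      · rw [hrm] at h
        simp only at h
        split_ifs at h with h2
        · simp at h
          exact ⟨hd, List.mem_cons_self, h.1, h.2, h.1 ▸ h1⟩
        · simp at h
          obtain ⟨kv, hmem, hrest⟩ := ih q w hrm
          exact ⟨kv, List.mem_cons_of_mem _ hmem, h.1 ▸ hrest.1, h.2 ▸ hrest.2.1, h.1 ▸ hrest.2.2⟩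

-- if every pair matches nowhere, refMin is none
theorem refMin_none (line : String) (l : List (String × Int))
    (h : ∀ kv ∈ l, fpos line kv = -1) : refMin line l = none := by
  induction l with
  | nil => rfl
  | cons hd tl ih =>
    simp only [refMin]
    rw [if_pos (h hd List.mem_cons_self)]
    exact ih (fun kv hm => h kv (List.mem_cons_of_mem _ hm))

-- if all positions are -1 or ≥ j and kv is the first pair matching at j,
-- refMin picks (j, kv.2)
theorem refMin_first (line : String) (l : List (String × Int)) (j : ℕ)
    (hall : ∀ kv ∈ l, fpos line kv = -1 ∨ (j : Int) ≤ fpos line kv)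
    (kv : String × Int)
    (hf : l.find? (fun kv => kv.1.toList.isPrefixOf (line.toList.drop j)) = some kv) :
    refMin line l = some ((j : Int), kv.2) := by
  induction l with
  | nil => simp at hf
  | cons hd tl ih =>
    have hall' : ∀ kv ∈ tl, fpos line kv = -1 ∨ (j : Int) ≤ fpos line kv :=
      fun kv hm => hall kv (List.mem_cons_of_mem _ hm)
    by_cases hocc : hd.1.toList <+: line.toList.drop j
    · rw [List.find?_cons_of_pos (by simpa [List.isPrefixOf_iff_prefix] using hocc)] at hf
      have hkv : kv = hd := by simpa using hf.symm
      subst hkv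
      have hne := fpos_ne_neg_one_of_occ line kv j hocc
      have hle := fpos_le_of_occ line kv j hocc
      have hge : (j : Int) ≤ fpos line kv := by
        rcases hall kv List.mem_cons_self with h | h
        · exact absurd h hne
        · exact h
      have heq : fpos line kv = (j : Int) := le_antisymm hle hge
      simp only [refMin]
      rw [if_neg hne]
      rcases hrm : refMin line tl with _ | ⟨q, w⟩
      · rw [heq]
      · obtain ⟨kv', hmem', hq, _, hqne⟩ := refMin_mem line tl q w hrm
        have hqge : (j : Int) ≤ q := by
          rcases hall' kv' hmem' with h | h
          · exact absurd (hq ▸ h) hqne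
          · exact hq ▸ h
        simp [heq, hqge]
    · rw [List.find?_cons_of_neg (by simpa [List.isPrefixOf_iff_prefix] using hocc)] at hf
      simp only [refMin]
      by_cases h1 : fpos line hd = -1
      · rw [if_pos h1]; exact ih hall' hf
      · rw [if_neg h1]
        have hgt : (j : Int) < fpos line hd := by
          rcases hall hd List.mem_cons_self with h | h
          · exact absurd h h1
          · rcases lt_or_eq_of_le h with h' | h'
            · exact h'
            · exact absurd (occ_of_fpos line hd j h'.symm) hocc
        rw [ih hall' hf]
        simp [show ¬ fpos line hd ≤ (j : Int) by omega]

-- A's outer loop, characterized against refMin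
theorem cfOuter_eq (list : List (String × Int)) (line : String)
    (hnd : (list.map Prod.fst).Nodup)
    (hpre : ¬ (line = "" ∧ "" ∈ list.map Prod.fst)) :
    ∀ (c j₀ : ℕ), j₀ + c = line.toList.length →
    (∀ kv ∈ list, fpos line kv = -1 ∨ (j₀ : Int) ≤ fpos line kv) →
    cfOuter list line ((List.range' j₀ c).map (fun (k : ℕ) => (k : Int))) =
      (refMin line list).map Prod.snd := by
  intro c
  induction c with
  | zero =>
    intro j₀ hn hall
    have hnone : refMin line list = none := by
      apply refMin_none
      intro kv hm
      rcases hall kv hm with h | h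
      · exact h
      · by_contra hne
        have hlen := fpos_add_len_le line kv hne
        have hk0 : kv.1.toList.length = 0 := by omega
        have hkey : kv.1 = "" := by
          have : kv.1.toList = [] := List.length_eq_zero_iff.mp hk0
          exact String.toList_inj.mp (by simpa using this)
        have hfz : fpos line kv = 0 := by
          unfold fpos; rw [hkey]
          exact PySem.Chars.find_nil _
        have hn0 : line.toList.length = 0 := by omega
        have hline : line = "" := by
          have : line.toList = [] := List.length_eq_zero_iff.mp hn0
          exact String.toList_inj.mp (by simpa using this)
        exact hpre ⟨hline, hkey ▸ List.mem_map_of_mem hm⟩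
    rw [hnone]
    rfl
  | succ c ih =>
    intro j₀ hn hall
    rw [List.range'_succ, List.map_cons]
    simp only [cfOuter]
    rw [cfInner_eq list line j₀ (by omega) list]
    rcases hfind : list.find? (fun kv => kv.1.toList.isPrefixOf (line.toList.drop j₀)) with _ | kv
    · rw [hfind]
      have hall' : ∀ kv ∈ list, fpos line kv = -1 ∨ ((j₀ + 1 : ℕ) : Int) ≤ fpos line kv := by
        intro kv hm
        rcases hall kv hm with h | h
        · exact Or.inl h
        · right
          have hne : fpos line kv ≠ (j₀ : Int) := by
            intro heq
            have hocc := occ_of_fpos line kv j₀ heq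
            have := List.find?_eq_none.mp hfind kv hm
            simp [List.isPrefixOf_iff_prefix] at this
            exact this hocc
          push_cast
          omega
      exact ih (j₀ + 1) (by omega) hall'
    · have hmem := List.mem_of_find?_eq_some hfind
      rw [hfind]
      simp only
      rw [pyDictGet_nodup list kv hnd hmem]
      rw [refMin_first line list j₀ hall kv hfind]
      rfl

-- B's fold, characterized against refMin
theorem foldB_eq (line : String) (l : List (String × Int)) (bp : Int) (bv : Option Int) :
    l.foldl
      (fun best kv =>
        let p := PySem.Str.find line kv.1
        if p ≠ -1 ∧ (best.1 = -1 ∨ p < best.1) then (p, some kv.2) else best)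
      (bp, bv) =
      match refMin line l with
      | none => (bp, bv)
      | some (p, v) => if bp = -1 ∨ p < bp then (p, some v) else (bp, bv) := by
  induction l generalizing bp bv with
  | nil => simp [refMin]
  | cons hd tl ih =>
    have hfp : PySem.Str.find line hd.1 = fpos line hd := by
      simp [fpos, PySem.Str.find_eq]
    rw [List.foldl_cons, ih]
    simp only [refMin, hfp]
    by_cases h1 : fpos line hd = -1
    · rw [if_pos h1]
      rw [if_neg (by simp [h1])]
    · rw [if_neg h1]
      have h1' : 0 ≤ fpos line hd := by
        have := neg_one_le_fpos line hd; omega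
      rcases hrm : refMin line tl with _ | ⟨q, w⟩
      · simp only
        split_ifs with hc <;> simp_all
      · obtain ⟨kv', _, _, _, hqne⟩ := refMin_mem line tl q w hrm
        simp only
        split_ifs <;> simp_all <;> omega

-- ===== VERDICT (by name: the statement is the Claim_ definition above) =====
theorem checkForwards_spec : Claim_equal_checkForwards := by
  intro list line _ hpre
  obtain ⟨hnd, hcorner⟩ := hpre
  unfold Spec_checkForwards checkForwards checkForwards_alt
  rw [PySem.Str.len_eq, PySem.List.pyRange_one]
  have h1 : ((line.toList.length : Int) - 0).toNat = line.toList.length := by omega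
  rw [h1]
  have h2 : (List.range line.toList.length).map (fun (k : ℕ) => (0 : Int) + (k : Int)) =
      (List.range' 0 line.toList.length).map (fun (k : ℕ) => (k : Int)) := by
    rw [List.range_eq_range']
    simp
  rw [h2]
  rw [cfOuter_eq list line hnd hcorner line.toList.length 0 (by omega)
    (fun kv _ => by rcases eq_or_ne (fpos line kv) (-1) with h | h
                    · exact Or.inl h
                    · right; have := neg_one_le_fpos line kv; omega)]
  rw [foldB_eq]
  rcases refMin line list with _ | ⟨p, v⟩
  · rfl
  · simp
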